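-- pv_equiv track=rewrite | github.com/mathieuxu/PITH-Parameter-InheriTance-HyperNetwork | pith/ppuda-main/ppuda/vision/imagenet_test.py | split_train_and_val
-- ===== SOURCE A (Python) =====
-- from collections import defaultdict
--
-- def split_train_and_val(list_of_tups, num_val_per_class=50):
--
--     class_dict = defaultdict(list)
--
--     for item in list_of_tups:
--         class_dict[item[1]].append(item)
--
--     train_samples, val_samples = [], []
--
--     # fix the class ordering
--     for k in sorted(class_dict.keys()):
--         v = class_dict[k]
--
--         # last num_val_per_class will be the val samples
--         train_samples.extend(v[:-num_val_per_class])
--         val_samples.extend(v[-num_val_per_class:])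
--
--     return train_samples, val_samples
-- ===== SOURCE B (Python) =====
-- def split_train_and_val(list_of_tups, num_val_per_class=50):
--     train_samples, val_samples = [], []
--     for k in sorted({t[1] for t in list_of_tups}):
--         v = [t for t in list_of_tups if t[1] == k]
--         train_samples.extend(v[:-num_val_per_class])
--         val_samples.extend(v[-num_val_per_class:])
--     return train_samples, val_samples
-- ===== Notes on version B (the rewrite author's own statement) =====
-- stated objective: simpler
-- what changed: Replaces the defaultdict grouping pass (then sorting the dict's keys) by sorting the set of class labels directly and selecting each class's samples with a filter comprehension per class; no dict is built or looked up.
import Mathlib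
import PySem

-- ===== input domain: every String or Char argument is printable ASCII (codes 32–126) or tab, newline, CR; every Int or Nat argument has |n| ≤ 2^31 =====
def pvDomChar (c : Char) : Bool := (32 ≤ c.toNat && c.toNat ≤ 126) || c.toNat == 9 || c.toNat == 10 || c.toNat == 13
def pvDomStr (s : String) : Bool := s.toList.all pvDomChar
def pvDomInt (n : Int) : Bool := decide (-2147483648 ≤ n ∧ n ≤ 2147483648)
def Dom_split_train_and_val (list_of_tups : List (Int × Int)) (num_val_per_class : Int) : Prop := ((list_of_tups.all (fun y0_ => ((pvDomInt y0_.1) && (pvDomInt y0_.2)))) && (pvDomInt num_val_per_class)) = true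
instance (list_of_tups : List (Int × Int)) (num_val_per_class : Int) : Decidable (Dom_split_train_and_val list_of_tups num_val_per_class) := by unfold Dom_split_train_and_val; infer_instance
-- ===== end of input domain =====

-- B replaces A's defaultdict grouping + key sort by sorting the set of class labels and
-- filtering the list once per class (simpler: no dict; same return value everywhere).

-- ===== PORT A =====
-- class_dict[item[1]].append(item) over a defaultdict(list)
def pvStepA (d : PySem.Dict Int (List (Int × Int))) (item : Int × Int) : PySem.Dict Int (List (Int × Int)) :=
  d.modify item.2 [] (fun v => v ++ [item])

def split_train_and_val (list_of_tups : List (Int × Int)) (num_val_per_class : Int) : (List (Int × Int)) × (List (Int × Int)) :=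
  let class_dict := list_of_tups.foldl pvStepA (PySem.Dict.mk [])
  (PySem.List.sorted class_dict.keys id).foldl
    (fun acc k =>
      let v := class_dict.getD k []
      (acc.1 ++ PySem.List.slice v none (some (-num_val_per_class)),
       acc.2 ++ PySem.List.slice v (some (-num_val_per_class)) none))
    ([], [])

-- ===== PORT B =====
def split_train_and_val_alt (list_of_tups : List (Int × Int)) (num_val_per_class : Int) : (List (Int × Int)) × (List (Int × Int)) :=
  (PySem.List.sorted (PySem.Set.ofList (list_of_tups.map (·.2))) id).foldl
    (fun acc k =>
      let v := list_of_tups.filter (fun t => t.2 == k)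
      (acc.1 ++ PySem.List.slice v none (some (-num_val_per_class)),
       acc.2 ++ PySem.List.slice v (some (-num_val_per_class)) none))
    ([], [])

-- ===== PRECONDITION & SPEC =====
def Spec_split_train_and_val (list_of_tups : List (Int × Int)) (num_val_per_class : Int) (out : (List (Int × Int)) × (List (Int × Int))) : Prop := out = split_train_and_val_alt list_of_tups num_val_per_class
instance (list_of_tups : List (Int × Int)) (num_val_per_class : Int) (out : (List (Int × Int)) × (List (Int × Int))) : Decidable (Spec_split_train_and_val list_of_tups num_val_per_class out) := by unfold Spec_split_train_and_val; infer_instance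

-- ===== CLAIM (what is proved, stated in full; the proofs are below) =====
def Claim_equal_split_train_and_val : Prop := ∀ (list_of_tups : List (Int × Int)) (num_val_per_class : Int), Dom_split_train_and_val list_of_tups num_val_per_class → Spec_split_train_and_val list_of_tups num_val_per_class (split_train_and_val list_of_tups num_val_per_class)

-- ===== LEMMAS AND PROOFS =====

-- the fold accumulates, per key, exactly the filter of the input by that key
theorem pv_getD_fold (xs : List (Int × Int)) (d : PySem.Dict Int (List (Int × Int))) (k : Int) :
    (xs.foldl pvStepA d).getD k [] = d.getD k [] ++ xs.filter (fun t => t.2 == k) := by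
  induction xs generalizing d with
  | nil => simp
  | cons x xs ih =>
    simp only [List.foldl_cons, List.filter_cons, ih]
    by_cases h : x.2 = k
    · simp [pvStepA, PySem.Dict.modify, h]
    · simp [pvStepA, PySem.Dict.modify, PySem.Dict.getD_insert, h, Ne.symm h]

theorem pv_mem_keys_fold (xs : List (Int × Int)) (d : PySem.Dict Int (List (Int × Int))) (k : Int) :
    k ∈ (xs.foldl pvStepA d).keys ↔ k ∈ d.keys ∨ k ∈ xs.map (·.2) := by
  induction xs generalizing d with
  | nil => simp
  | cons x xs ih =>
    simp only [List.foldl_cons, ih, pvStepA, PySem.Dict.modify, PySem.Dict.mem_keys_insert,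
      List.map_cons, List.mem_cons]
    tauto

theorem pv_keys_insert {ν : Type} (d : PySem.Dict Int ν) (k : Int) (v : ν) :
    (d.insert k v).keys = if d.contains k then d.keys else d.keys ++ [k] := by
  simp only [PySem.Dict.insert, PySem.Dict.keys]
  split
  · simp only [List.map_map]
    refine List.map_congr_left fun p _ => ?_
    by_cases h : p.1 = k <;> simp [h]
  · simp

theorem pv_contains_iff {ν : Type} (d : PySem.Dict Int ν) (k : Int) :
    d.contains k = true ↔ k ∈ d.keys := by
  simp [PySem.Dict.contains, PySem.Dict.keys, List.any_eq_true, List.mem_map]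

theorem pv_nodup_keys_fold (xs : List (Int × Int)) (d : PySem.Dict Int (List (Int × Int)))
    (hd : d.keys.Nodup) : (xs.foldl pvStepA d).keys.Nodup := by
  induction xs generalizing d with
  | nil => exact hd
  | cons x xs ih =>
    refine ih _ ?_
    simp only [pvStepA, PySem.Dict.modify, pv_keys_insert]
    split
    · exact hd
    · rename_i h
      have : x.2 ∉ d.keys := fun hm => h ((pv_contains_iff d x.2).mpr hm)
      rw [List.nodup_append]
      refine ⟨hd, List.nodup_singleton _, ?_⟩
      intro a ha b hb
      exact fun hab => this ((hab.trans (List.mem_singleton.mp hb)) ▸ ha)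

theorem pv_sorted_keys_eq (xs : List (Int × Int)) :
    PySem.List.sorted (xs.foldl pvStepA (PySem.Dict.mk [])).keys id
      = PySem.List.sorted (PySem.Set.ofList (xs.map (·.2))) id := by
  have hka : ((xs.foldl pvStepA (PySem.Dict.mk [])).keys).Nodup :=
    pv_nodup_keys_fold xs _ (by simp [PySem.Dict.keys])
  have hperm : ((xs.foldl pvStepA (PySem.Dict.mk [])).keys).Perm
      (PySem.Set.ofList (xs.map (·.2))) := by
    refine (List.perm_ext_iff_of_nodup hka (PySem.Set.nodup_ofList _)).mpr fun k => ?_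
    rw [pv_mem_keys_fold, PySem.Set.mem_ofList]
    simp [PySem.Dict.keys]
  have hsp := PySem.List.sorted_perm ((xs.foldl pvStepA (PySem.Dict.mk [])).keys) (id) false
  have hlt : List.Pairwise (fun a b : Int => id a < id b)
      (PySem.List.sorted (xs.foldl pvStepA (PySem.Dict.mk [])).keys id) := by
    have hle := PySem.List.sorted_pairwise ((xs.foldl pvStepA (PySem.Dict.mk [])).keys) (id)
    have hnd : (PySem.List.sorted (xs.foldl pvStepA (PySem.Dict.mk [])).keys id).Nodup :=
      hsp.nodup_iff.mpr hka
    exact (hle.and hnd).imp (fun h => lt_of_le_of_ne h.1 h.2)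
  exact (PySem.List.sorted_eq_of_perm_of_pairwise_lt _ _ id
    (hsp.trans hperm) hlt).symm

-- ===== VERDICT (by name: the statement is the Claim_ definition above) =====
theorem split_train_and_val_spec : Claim_equal_split_train_and_val := by
  intro xs n _
  unfold Spec_split_train_and_val
  simp only [split_train_and_val, split_train_and_val_alt]
  rw [pv_sorted_keys_eq]
  congr 1
  funext acc k
  rw [pv_getD_fold]
  simp [PySem.Dict.getD, PySem.Dict.get?]
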